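-- pv_equiv track=rewrite | github.com/ZehuaKcrissLi/info-arbitrage-stock | src/agents/debate_agents.py | _check_convergence
-- ===== SOURCE A (Python) =====
-- from typing import List, Tuple, Dict, Any, Optional
--
-- def _check_convergence(debate_history: List[Tuple[str, str]]) -> bool:
--     """Check if debate has converged to a conclusion"""
--     if len(debate_history) < 4:
--         return False
--
--     # Simple convergence check - if last bull and bear positions are similar
--     last_bull = None
--     last_bear = None
--
--     for role, position in reversed(debate_history):
--         if role.startswith("BULL") and last_bull is None:
--             last_bull = position
--         elif role.startswith("BEAR") and last_bear is None:
--             last_bear = position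
--
--         if last_bull and last_bear:
--             break
--
--     if last_bull and last_bear:
--         # Check for convergence keywords
--         convergence_keywords = ["agree", "consensus", "similar", "aligned"]
--         bull_lower = last_bull.lower()
--         bear_lower = last_bear.lower()
--
--         return any(keyword in bull_lower or keyword in bear_lower for keyword in convergence_keywords)
--
--     return False
-- ===== SOURCE B (Python) =====
-- from typing import List, Tuple
--
-- def _check_convergence(debate_history: List[Tuple[str, str]]) -> bool:
--     """Check if debate has converged to a conclusion"""
--     if len(debate_history) < 4:
--         return False
--
--     # Group by 4-char role prefix into a dict; overwriting means the dict holds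
--     # the LAST position per prefix, so no reversed scan / Option state is needed.
--     latest = {}
--     for role, position in debate_history:
--         latest[role[:4]] = position
--
--     last_bull = latest.get("BULL")
--     last_bear = latest.get("BEAR")
--     if not (last_bull and last_bear):
--         return False
--
--     keywords = ["agree", "consensus", "similar", "aligned"]
--
--     def hits(text):
--         return any(k in text for k in keywords)
--
--     return hits(last_bull.lower()) or hits(last_bear.lower())
-- ===== Notes on version B (the rewrite author's own statement) =====
-- stated objective: alternative
-- what changed: Replaces A's reversed first-match scan with Option state and early break by a grouping dict keyed on the 4-char role prefix (overwrite = last wins) plus two lookups, and splits the keyword test into hits(bull) or hits(bear) instead of one any over a disjunction.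
import Mathlib
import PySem

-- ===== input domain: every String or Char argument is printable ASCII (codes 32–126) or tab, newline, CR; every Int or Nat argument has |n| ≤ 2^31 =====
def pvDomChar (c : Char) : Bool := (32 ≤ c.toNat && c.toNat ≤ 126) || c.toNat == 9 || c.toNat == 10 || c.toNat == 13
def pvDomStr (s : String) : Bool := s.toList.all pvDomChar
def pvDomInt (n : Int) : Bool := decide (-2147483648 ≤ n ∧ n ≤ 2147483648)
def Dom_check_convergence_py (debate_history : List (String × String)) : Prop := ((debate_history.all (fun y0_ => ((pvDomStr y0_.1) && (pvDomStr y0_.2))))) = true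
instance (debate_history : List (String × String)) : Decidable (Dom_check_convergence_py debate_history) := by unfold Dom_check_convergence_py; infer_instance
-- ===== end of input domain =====

-- B replaces A's reversed first-match scan (Option state + early break) by a grouping
-- dict keyed on the 4-char role prefix (overwrite = last wins) plus two lookups,
-- and splits the keyword test into hits(bull) || hits(bear); same behaviour.

-- Python truthiness of an Optional[str]
def pyTruthyS (o : Option String) : Bool :=
  match o with
  | none => false
  | some s => !(s == "")

def convKeywords : List String := ["agree", "consensus", "similar", "aligned"]

-- ===== PORT A =====
-- A's loop over reversed(debate_history): first-match Option state, break when both truthy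
def convLoopA : List (String × String) → Option String → Option String → Option String × Option String
  | [], lb, lr => (lb, lr)
  | (role, position) :: rest, lb, lr =>
    let lb' := if PySem.Str.startswith role "BULL" && lb.isNone then some position else lb
    let lr' := if !(PySem.Str.startswith role "BULL" && lb.isNone) &&
                  (PySem.Str.startswith role "BEAR" && lr.isNone) then some position else lr
    if pyTruthyS lb' && pyTruthyS lr' then (lb', lr') else convLoopA rest lb' lr'

def check_convergence_py (debate_history : List (String × String)) : Bool :=
  if debate_history.length < 4 then false
  else
    let p := convLoopA debate_history.reverse none none
    if pyTruthyS p.1 && pyTruthyS p.2 then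
      let bl := PySem.Str.lower (p.1.getD "")
      let rl := PySem.Str.lower (p.2.getD "")
      convKeywords.any (fun k => PySem.Str.isIn k bl || PySem.Str.isIn k rl)
    else false

-- ===== PORT B =====
-- helper of B: any(k in text for k in keywords)
def hitsKw (text : String) : Bool := convKeywords.any (fun k => PySem.Str.isIn k text)

-- B: one grouping pass into a dict keyed by role[:4] (overwrite keeps the last), two lookups
def check_convergence_py_alt (debate_history : List (String × String)) : Bool :=
  if debate_history.length < 4 then false
  else
    let latest := debate_history.foldl
      (fun (d : PySem.Dict String String) rp =>
        d.insert (PySem.Str.slice rp.1 none (some 4)) rp.2)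
      PySem.Dict.empty
    let last_bull := latest.get? "BULL"
    let last_bear := latest.get? "BEAR"
    if !(pyTruthyS last_bull && pyTruthyS last_bear) then false
    else
      hitsKw (PySem.Str.lower (last_bull.getD "")) || hitsKw (PySem.Str.lower (last_bear.getD ""))

-- ===== PRECONDITION & SPEC =====
def Spec_check_convergence_py (debate_history : List (String × String)) (out : Bool) : Prop := out = check_convergence_py_alt debate_history
instance (debate_history : List (String × String)) (out : Bool) : Decidable (Spec_check_convergence_py debate_history out) := by unfold Spec_check_convergence_py; infer_instance

-- ===== CLAIM =====
def Claim_equal_check_convergence_py : Prop := ∀ (debate_history : List (String × String)), Dom_check_convergence_py debate_history → Spec_check_convergence_py debate_history (check_convergence_py debate_history)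

-- ===== LEMMAS AND PROOFS =====

def bullP : String × String → Bool := fun rp => PySem.Str.startswith rp.1 "BULL"
def bearP : String × String → Bool := fun rp => PySem.Str.startswith rp.1 "BEAR"

-- no role starts with both "BULL" and "BEAR"
lemma not_both (role : String) :
    ¬(PySem.Chars.startswith role.toList ['B','U','L','L'] = true ∧
      PySem.Chars.startswith role.toList ['B','E','A','R'] = true) := by
  rintro ⟨h1, h2⟩
  rw [PySem.Chars.startswith_iff] at h1 h2
  obtain ⟨t1, e1⟩ := h1
  obtain ⟨t2, e2⟩ := h2
  rw [← e1] at e2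
  simp at e2

lemma map_or' {α β : Type} (f : α → β) (a b : Option α) :
    (a.or b).map f = (a.map f).or (b.map f) := by
  cases a <;> rfl

-- A's loop computes: first match in its argument, appended behind the incoming state
lemma loopA_eq (l : List (String × String)) (lb lr : Option String) :
    convLoopA l lb lr =
      (lb.or ((l.find? bullP).map (·.2)), lr.or ((l.find? bearP).map (·.2))) := by
  induction l generalizing lb lr with
  | nil => simp [convLoopA]
  | cons x rest ih =>
    obtain ⟨role, position⟩ := x
    have step1 : (if PySem.Str.startswith role "BULL" && lb.isNone then some position else lb)
        = lb.or ((List.find? bullP [(role, position)]).map (·.2)) := by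
      cases lb <;> by_cases hb : PySem.Chars.startswith role.toList ['B','U','L','L'] = true <;>
        simp [List.find?, bullP, hb]
    have step2 : (if !(PySem.Str.startswith role "BULL" && lb.isNone) &&
                    (PySem.Str.startswith role "BEAR" && lr.isNone) then some position else lr)
        = lr.or ((List.find? bearP [(role, position)]).map (·.2)) := by
      by_cases hr : PySem.Chars.startswith role.toList ['B','E','A','R'] = true
      · have hnb : PySem.Chars.startswith role.toList ['B','U','L','L'] = false := by
          by_contra h
          exact not_both role ⟨by simpa using h, hr⟩
        cases lr <;> simp [List.find?, bearP, hr, hnb]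
      · cases lr <;> simp [List.find?, bearP, hr]
    have hfind1 : List.find? bullP ((role, position) :: rest)
        = (List.find? bullP [(role, position)]).or (List.find? bullP rest) := by
      by_cases hb : bullP (role, position) = true <;> simp [List.find?, hb]
    have hfind2 : List.find? bearP ((role, position) :: rest)
        = (List.find? bearP [(role, position)]).or (List.find? bearP rest) := by
      by_cases hb : bearP (role, position) = true <;> simp [List.find?, hb]
    simp only [convLoopA]
    rw [step1, step2, hfind1, hfind2, map_or', map_or',
        ← Option.or_assoc, ← Option.or_assoc]
    split
    · rename_i hT
      rcases e1 : lb.or ((List.find? bullP [(role, position)]).map (·.2)) with _ | s1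
      · rw [e1] at hT; simp [pyTruthyS] at hT
      rcases e2 : lr.or ((List.find? bearP [(role, position)]).map (·.2)) with _ | s2
      · rw [e2] at hT; simp [pyTruthyS] at hT
      rw [e1, e2]; rfl
    · rw [ih, Option.or_assoc, Option.or_assoc]

-- the key role[:4] equals a 4-char pattern iff the role starts with that pattern
lemma slice4_beq (role pat : String) (hp : pat.toList.length = 4) :
    (PySem.Str.slice role none (some 4) == pat) = PySem.Str.startswith role pat := by
  rw [Bool.eq_iff_iff, beq_iff_eq]
  have hsl : (PySem.Str.slice role none (some 4)).toList = role.toList.take 4 := by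
    simp only [PySem.Str.toList_slice, PySem.Chars.slice_eq_listSlice]
    rw [show PySem.List.slice role.toList none (some 4) = role.toList.take (4:Int).toNat from
      PySem.List.slice_to role.toList (by norm_num)]
    rfl
  constructor
  · intro h
    have hl : role.toList.take 4 = pat.toList := by rw [← hsl, h]
    simp only [PySem.Str.startswith_eq, PySem.Chars.startswith_iff]
    exact ⟨role.toList.drop 4, by rw [← hl, List.take_append_drop]⟩
  · intro h
    simp only [PySem.Str.startswith_eq, PySem.Chars.startswith_iff] at h
    obtain ⟨t, ht⟩ := h
    have : (PySem.Str.slice role none (some 4)).toList = pat.toList := by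
      rw [hsl, ← ht]
      exact List.take_left' hp
    exact String.toList_injective this

-- B's dict pass: lookup at k is the value of the LAST pair whose role[:4] is k
lemma dictFold_get? (l : List (String × String)) (d : PySem.Dict String String) (k : String) :
    (l.foldl (fun (d : PySem.Dict String String) rp =>
        d.insert (PySem.Str.slice rp.1 none (some 4)) rp.2) d).get? k
      = ((l.reverse.find? (fun rp => PySem.Str.slice rp.1 none (some 4) == k)).map (·.2)).or
          (d.get? k) := by
  induction l generalizing d with
  | nil => simp
  | cons x rest ih =>
    obtain ⟨role, pos⟩ := x
    rw [List.foldl_cons, ih]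
    have hone : (List.find? (fun rp => PySem.Str.slice rp.1 none (some 4) == k) [(role, pos)]).map (·.2)
        = if PySem.Str.slice role none (some 4) == k then some pos else none := by
      by_cases h : (PySem.Str.slice role none (some 4) == k) = true <;> simp [List.find?, h]
    have hins : (d.insert (PySem.Str.slice role none (some 4)) pos).get? k
        = (if PySem.Str.slice role none (some 4) == k then some pos else none).or (d.get? k) := by
      by_cases h : PySem.Str.slice role none (some 4) = k
      · subst h; simp [PySem.Dict.get?_insert_self]
      · rw [PySem.Dict.get?_insert_of_ne d pos (fun e => h e.symm)]
        simp [beq_iff_eq, h]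
    rw [hins, ← hone, List.reverse_cons, List.find?_append, map_or', Option.or_assoc]

lemma any_or_split (l : List String) (f g : String → Bool) :
    (l.any fun k => f k || g k) = (l.any f || l.any g) := by
  induction l with
  | nil => rfl
  | cons x xs ih =>
    simp only [List.any_cons, ih]
    cases f x <;> cases g x <;> cases xs.any f <;> cases xs.any g <;> rfl

-- ===== VERDICT =====
theorem check_convergence_py_spec : Claim_equal_check_convergence_py := by
  intro l _
  unfold Spec_check_convergence_py check_convergence_py check_convergence_py_alt
  by_cases hlen : l.length < 4
  · simp [hlen]
  · simp only [hlen, if_false]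
    rw [loopA_eq, dictFold_get?, dictFold_get?]
    have hb : (fun rp : String × String => PySem.Str.slice rp.1 none (some 4) == "BULL") = bullP := by
      funext rp; exact slice4_beq rp.1 "BULL" rfl
    have hr : (fun rp : String × String => PySem.Str.slice rp.1 none (some 4) == "BEAR") = bearP := by
      funext rp; exact slice4_beq rp.1 "BEAR" rfl
    have hemp : ∀ k : String, (PySem.Dict.empty : PySem.Dict String String).get? k = none :=
      fun _ => rfl
    rw [hb, hr]
    simp only [hemp, Option.or_none, Option.none_or]
    set a := (List.find? bullP l.reverse).map (·.2) with ha
    set b := (List.find? bearP l.reverse).map (·.2) with hbb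
    by_cases h : (pyTruthyS a && pyTruthyS b) = true
    · simp only [h, hitsKw]
      simp only [Bool.not_true, Bool.false_eq_true, if_false, if_true]
      exact any_or_split convKeywords _ _
    · simp [h]
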